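-- pv_equiv track=rewrite | github.com/mrajaonson/music21-mscore | converters/solfa2pdf/solfa_parser.py | _parse_voice_labels
-- ===== SOURCE A (Python) =====
-- from typing import List, Optional
--
-- def _parse_voice_labels(voice_str: str) -> List[str]:
--     """Parse concatenated voice labels like 'SA', 'S1S2T' into a list"""
--     labels = []
--     i = 0
--     while i < len(voice_str):
--         if voice_str[i] in 'SATB':
--             if i + 1 < len(voice_str) and voice_str[i + 1].isdigit():
--                 labels.append(voice_str[i:i + 2])
--                 i += 2
--             else:
--                 labels.append(voice_str[i])
--                 i += 1
--         else:
--             break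
--     # Only valid if we consumed the entire string
--     if i == len(voice_str) and labels:
--         return labels
--     return []
-- ===== SOURCE B (Python) =====
-- def _parse_voice_labels(voice_str):
--     """Parse concatenated voice labels like 'SA', 'S1S2T' into a list.
--
--     Single forward pass over the characters with a one-slot pending-letter state
--     (no index arithmetic, no lookahead).
--     """
--     labels = []
--     pending = ''
--     for ch in voice_str:
--         if ch in 'SATB':
--             if pending:
--                 labels.append(pending)
--             pending = ch
--         elif ch.isdigit() and pending:
--             labels.append(pending + ch)
--             pending = ''
--         else:
--             return []
--     if pending:
--         labels.append(pending)
--     return labels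
-- ===== Notes on version B (the rewrite author's own statement) =====
-- stated objective: simpler
-- what changed: Replaces the index-advancing scan with one-character lookahead by a single for-each-character state machine carrying a one-slot pending-letter accumulator (no index arithmetic, no slicing, early return on a bad character).
import Mathlib
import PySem

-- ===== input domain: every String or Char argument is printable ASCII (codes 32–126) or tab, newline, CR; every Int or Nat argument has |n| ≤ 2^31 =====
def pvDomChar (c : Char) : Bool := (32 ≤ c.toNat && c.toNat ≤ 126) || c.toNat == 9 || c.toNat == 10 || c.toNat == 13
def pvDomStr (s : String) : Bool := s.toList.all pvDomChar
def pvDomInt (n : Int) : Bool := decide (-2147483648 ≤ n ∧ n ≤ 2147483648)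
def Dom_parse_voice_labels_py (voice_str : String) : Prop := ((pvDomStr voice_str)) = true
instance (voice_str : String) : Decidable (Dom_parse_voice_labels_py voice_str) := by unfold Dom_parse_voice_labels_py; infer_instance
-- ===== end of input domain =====

-- B replaces A's index-advancing scan with lookahead by a one-pass state machine with a pending-letter slot (objective: simpler).

-- shared trivial helper: membership test `c in 'SATB'`
def pvSATB (c : Char) : Bool := c = 'S' || c = 'A' || c = 'T' || c = 'B'

-- ===== PORT A =====
-- transliteration of A's while-loop over index i with labels accumulator
def pvALoop (cs : List Char) (i : Nat) (labels : List String) : Nat × List String :=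
  if h : i < cs.length then
    if pvSATB cs[i] then
      if h2 : i + 1 < cs.length then
        if cs[i + 1].isDigit then
          pvALoop cs (i + 2) (labels ++ [String.mk [cs[i], cs[i + 1]]])
        else
          pvALoop cs (i + 1) (labels ++ [String.mk [cs[i]]])
      else
        pvALoop cs (i + 1) (labels ++ [String.mk [cs[i]]])
    else (i, labels)
  else (i, labels)
termination_by cs.length - i

def parse_voice_labels_py (voice_str : String) : List String :=
  let r := pvALoop voice_str.toList 0 []
  if r.1 = voice_str.toList.length ∧ r.2 ≠ [] then r.2 else []

-- ===== PORT B =====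
-- transliteration of B's for-each-character state machine (pending : Option Char is B's pending slot)
def pvBLoop (cs : List Char) (labels : List String) (pending : Option Char) : List String :=
  match cs with
  | [] => labels ++ pending.elim [] (fun c => [String.mk [c]])
  | ch :: rest =>
    if pvSATB ch then
      pvBLoop rest (labels ++ pending.elim [] (fun c => [String.mk [c]])) (some ch)
    else
      match pending with
      | some c => if ch.isDigit then pvBLoop rest (labels ++ [String.mk [c, ch]]) none else []
      | none => []

def parse_voice_labels_py_alt (voice_str : String) : List String :=
  pvBLoop voice_str.toList [] none

-- ===== PRECONDITION & SPEC =====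
def Spec_parse_voice_labels_py (voice_str : String) (out : List String) : Prop := out = parse_voice_labels_py_alt voice_str
instance (voice_str : String) (out : List String) : Decidable (Spec_parse_voice_labels_py voice_str out) := by unfold Spec_parse_voice_labels_py; infer_instance

-- ===== CLAIM (what is proved, stated in full; the proofs are below) =====
def Claim_equal_parse_voice_labels_py : Prop := ∀ (voice_str : String), Dom_parse_voice_labels_py voice_str → Spec_parse_voice_labels_py voice_str (parse_voice_labels_py voice_str)

-- ===== LEMMAS AND PROOFS =====

-- proof-side characterisation: how far the greedy tokenizer consumes, and the tokens it emits
def pvStop : List Char → Nat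
  | [] => 0
  | c :: rest =>
    if pvSATB c then
      match rest with
      | d :: rest' => if d.isDigit then 2 + pvStop rest' else 1 + pvStop (d :: rest')
      | [] => 1
    else 0

def pvToks : List Char → List String
  | [] => []
  | c :: rest =>
    if pvSATB c then
      match rest with
      | d :: rest' =>
        if d.isDigit then String.mk [c, d] :: pvToks rest'
        else String.mk [c] :: pvToks (d :: rest')
      | [] => [String.mk [c]]
    else []

lemma pvSATB_not_digit {c : Char} (h : pvSATB c = true) : c.isDigit = false := by
  simp [pvSATB] at h
  rcases h with ((rfl | rfl) | rfl) | rfl <;> decide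

lemma pvStop_bad {c : Char} (rest : List Char) (h : pvSATB c = false) :
    pvStop (c :: rest) = 0 := by
  cases rest <;> simp [pvStop, h]

lemma pvToks_bad {c : Char} (rest : List Char) (h : pvSATB c = false) :
    pvToks (c :: rest) = [] := by
  cases rest <;> simp [pvToks, h]

lemma pvStop_single {c : Char} (h : pvSATB c = true) : pvStop [c] = 1 := by
  simp [pvStop, h]

lemma pvToks_single {c : Char} (h : pvSATB c = true) : pvToks [c] = [String.mk [c]] := by
  simp [pvToks, h]

lemma pvStop_digit {c d : Char} (rest : List Char) (hc : pvSATB c = true)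
    (hd : d.isDigit = true) : pvStop (c :: d :: rest) = 2 + pvStop rest := by
  simp [pvStop, hc, hd]

lemma pvToks_digit {c d : Char} (rest : List Char) (hc : pvSATB c = true)
    (hd : d.isDigit = true) : pvToks (c :: d :: rest) = String.mk [c, d] :: pvToks rest := by
  simp [pvToks, hc, hd]

lemma pvStop_nodigit {c d : Char} (rest : List Char) (hc : pvSATB c = true)
    (hd : d.isDigit = false) : pvStop (c :: d :: rest) = 1 + pvStop (d :: rest) := by
  simp [pvStop, hc, hd]

lemma pvToks_nodigit {c d : Char} (rest : List Char) (hc : pvSATB c = true)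
    (hd : d.isDigit = false) : pvToks (c :: d :: rest) = String.mk [c] :: pvToks (d :: rest) := by
  simp [pvToks, hc, hd]

lemma pvALoop_eq (cs : List Char) (i : Nat) (labels : List String) (hi : i ≤ cs.length) :
    pvALoop cs i labels = (i + pvStop (cs.drop i), labels ++ pvToks (cs.drop i)) := by
  by_cases h : i < cs.length
  · have hdrop : cs.drop i = cs[i] :: cs.drop (i + 1) := List.drop_eq_getElem_cons h
    rw [pvALoop]
    simp only [dif_pos h]
    by_cases hs : pvSATB cs[i]
    · rw [if_pos hs]
      by_cases h2 : i + 1 < cs.length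
      · have hdrop2 : cs.drop (i + 1) = cs[i + 1] :: cs.drop (i + 2) := List.drop_eq_getElem_cons h2
        simp only [dif_pos h2]
        by_cases hd : cs[i + 1].isDigit
        · rw [if_pos hd]
          rw [pvALoop_eq cs (i + 2) _ (by omega)]
          rw [hdrop, hdrop2, pvStop_digit _ hs hd, pvToks_digit _ hs hd]
          refine Prod.ext (by simp; omega) (by simp)
        · rw [if_neg hd]
          rw [pvALoop_eq cs (i + 1) _ (by omega)]
          rw [hdrop, hdrop2]
          rw [pvStop_nodigit _ hs (by simpa using hd), pvToks_nodigit _ hs (by simpa using hd)]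
          rw [← hdrop2]
          refine Prod.ext (by simp; omega) (by simp)
      · have hdrop2 : cs.drop (i + 1) = [] := by
          apply List.drop_eq_nil_of_le; omega
        simp only [dif_neg h2]
        rw [pvALoop_eq cs (i + 1) _ (by omega)]
        rw [hdrop, hdrop2, pvStop_single hs, pvToks_single hs]
        refine Prod.ext (by simp [pvStop]) (by simp [pvToks])
    · rw [if_neg hs]
      rw [hdrop, pvStop_bad _ (by simpa using hs), pvToks_bad _ (by simpa using hs)]
      simp
  · have : i = cs.length := by omega
    subst this
    rw [pvALoop]
    simp [pvStop, pvToks]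
termination_by cs.length - i

lemma pvBLoop_eq (cs : List Char) :
    (∀ labels, pvBLoop cs labels none =
      if pvStop cs = cs.length then labels ++ pvToks cs else []) ∧
    (∀ labels c, pvSATB c = true → pvBLoop cs labels (some c) =
      if pvStop (c :: cs) = cs.length + 1 then labels ++ pvToks (c :: cs) else []) := by
  induction cs with
  | nil =>
    refine ⟨fun labels => by simp [pvBLoop, pvStop, pvToks], fun labels c hc => ?_⟩
    rw [pvBLoop, pvStop_single hc, pvToks_single hc]
    simp [Option.elim]
  | cons ch rest ih =>
    constructor
    · intro labels
      by_cases hs : pvSATB ch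
      · rw [pvBLoop, if_pos hs, ih.2 _ ch hs]
        simp [Option.elim]
      · rw [pvBLoop, if_neg hs]
        rw [pvStop_bad _ (by simpa using hs)]
        rw [if_neg (by simp)]
    · intro labels c hc
      by_cases hs : pvSATB ch
      · rw [pvBLoop, if_pos hs, ih.2 _ ch hs]
        rw [pvStop_nodigit _ hc (pvSATB_not_digit hs),
            pvToks_nodigit _ hc (pvSATB_not_digit hs)]
        simp only [Option.elim, List.length_cons]
        by_cases hcond : pvStop (ch :: rest) = rest.length + 1
        · rw [if_pos hcond, if_pos (by omega)]
          simp
        · rw [if_neg hcond, if_neg (by omega)]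
      · rw [pvBLoop, if_neg hs]
        by_cases hd : ch.isDigit
        · simp only [hd, if_true]
          rw [ih.1 (labels ++ [String.mk [c, ch]])]
          rw [pvStop_digit _ hc hd, pvToks_digit _ hc hd]
          simp only [List.length_cons]
          by_cases hcond : pvStop rest = rest.length
          · rw [if_pos hcond, if_pos (by omega)]
            simp
          · rw [if_neg hcond, if_neg (by omega)]
        · simp only [hd, Bool.false_eq_true, if_false]
          rw [pvStop_nodigit _ hc (by simpa using hd),
              pvStop_bad _ (by simpa using hs)]
          simp only [List.length_cons]
          have hne : ¬(1 + 0 = rest.length + 1 + 1) := by omega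
          rw [if_neg hne]

-- ===== VERDICT (by name: the statement is the Claim_ definition above) =====
theorem parse_voice_labels_py_spec : Claim_equal_parse_voice_labels_py := by
  intro s _
  unfold Spec_parse_voice_labels_py parse_voice_labels_py parse_voice_labels_py_alt
  rw [pvALoop_eq s.toList 0 [] (by omega)]
  rw [(pvBLoop_eq s.toList).1 []]
  simp only [List.drop_zero, List.nil_append, Nat.zero_add]
  by_cases hfull : pvStop s.toList = s.toList.length
  · rw [if_pos hfull]
    by_cases hne : pvToks s.toList = []
    · simp only [hne]
      rw [if_neg (by simp)]
    · rw [if_pos ⟨hfull, hne⟩]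
  · rw [if_neg hfull]
    rw [if_neg (by intro h; exact hfull h.1)]
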